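-- pv_equiv track=rewrite | github.com/srihari-122/Job-portal | ai_resume_analyzer.py | _get_devops_recommendations
-- ===== SOURCE A (Python) =====
-- from typing import Dict, List, Any
--
-- def _get_devops_recommendations(skills: List[str], experience: int) -> List[str]:
--     """DevOps specific recommendations"""
--     recommendations = []
--
--     if not any('kubernetes' in skill for skill in skills):
--         recommendations.append("Master Kubernetes for container orchestration")
--     if not any('terraform' in skill or 'ansible' in skill for skill in skills):
--         recommendations.append("Learn Infrastructure as Code (Terraform/Ansible)")
--     if not any('monitoring' in skill or 'prometheus' in skill for skill in skills):
--         recommendations.append("Implement monitoring and observability solutions")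
--     if not any('ci/cd' in skill or 'jenkins' in skill for skill in skills):
--         recommendations.append("Master CI/CD pipeline design and implementation")
--     if not any('security' in skill for skill in skills):
--         recommendations.append("Learn DevSecOps and security automation")
--
--     return recommendations
-- ===== SOURCE B (Python) =====
-- from typing import Dict, List, Any
--
-- def _get_devops_recommendations(skills: List[str], experience: int) -> List[str]:
--     """DevOps specific recommendations (single pass over skills building coverage flags)."""
--     has_k8s = has_iac = has_mon = has_cicd = has_sec = False
--     for skill in skills:
--         has_k8s = has_k8s or 'kubernetes' in skill
--         has_iac = has_iac or 'terraform' in skill or 'ansible' in skill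
--         has_mon = has_mon or 'monitoring' in skill or 'prometheus' in skill
--         has_cicd = has_cicd or 'ci/cd' in skill or 'jenkins' in skill
--         has_sec = has_sec or 'security' in skill
--     out = []
--     if not has_k8s:
--         out.append("Master Kubernetes for container orchestration")
--     if not has_iac:
--         out.append("Learn Infrastructure as Code (Terraform/Ansible)")
--     if not has_mon:
--         out.append("Implement monitoring and observability solutions")
--     if not has_cicd:
--         out.append("Master CI/CD pipeline design and implementation")
--     if not has_sec:
--         out.append("Learn DevSecOps and security automation")
--     return out
-- ===== Notes on version B (the rewrite author's own statement) =====
-- stated objective: faster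
-- what changed: Replaces five separate any()-membership scans over skills with a single traversal that accumulates five coverage flags, then emits the recommendations from the flags.
import Mathlib
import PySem

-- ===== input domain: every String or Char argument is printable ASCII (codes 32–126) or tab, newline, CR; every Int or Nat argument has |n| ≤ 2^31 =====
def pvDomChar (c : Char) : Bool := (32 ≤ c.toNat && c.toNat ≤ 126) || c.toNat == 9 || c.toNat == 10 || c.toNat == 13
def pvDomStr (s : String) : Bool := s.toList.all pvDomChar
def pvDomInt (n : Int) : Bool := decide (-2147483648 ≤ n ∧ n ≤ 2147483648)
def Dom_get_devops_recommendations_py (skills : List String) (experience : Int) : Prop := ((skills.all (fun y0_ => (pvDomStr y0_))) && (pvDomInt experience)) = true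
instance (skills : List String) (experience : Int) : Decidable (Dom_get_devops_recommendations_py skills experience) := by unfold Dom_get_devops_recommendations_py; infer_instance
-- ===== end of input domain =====

-- B builds five coverage flags in one pass then emits from the flags; A runs five any() scans. Same value everywhere.

-- ===== PORT A =====
def get_devops_recommendations_py (skills : List String) (experience : Int) : List String :=
  let recommendations : List String := []
  let recommendations := if !(skills.any (fun skill => PySem.Str.isIn "kubernetes" skill)) then
      recommendations ++ ["Master Kubernetes for container orchestration"] else recommendations
  let recommendations := if !(skills.any (fun skill => PySem.Str.isIn "terraform" skill || PySem.Str.isIn "ansible" skill)) then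
      recommendations ++ ["Learn Infrastructure as Code (Terraform/Ansible)"] else recommendations
  let recommendations := if !(skills.any (fun skill => PySem.Str.isIn "monitoring" skill || PySem.Str.isIn "prometheus" skill)) then
      recommendations ++ ["Implement monitoring and observability solutions"] else recommendations
  let recommendations := if !(skills.any (fun skill => PySem.Str.isIn "ci/cd" skill || PySem.Str.isIn "jenkins" skill)) then
      recommendations ++ ["Master CI/CD pipeline design and implementation"] else recommendations
  let recommendations := if !(skills.any (fun skill => PySem.Str.isIn "security" skill)) then
      recommendations ++ ["Learn DevSecOps and security automation"] else recommendations
  recommendations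

-- ===== PORT B =====
def get_devops_recommendations_py_alt (skills : List String) (experience : Int) : List String :=
  let flags := skills.foldl
    (fun (st : Bool × Bool × Bool × Bool × Bool) skill =>
      (st.1 || PySem.Str.isIn "kubernetes" skill,
       st.2.1 || PySem.Str.isIn "terraform" skill || PySem.Str.isIn "ansible" skill,
       st.2.2.1 || PySem.Str.isIn "monitoring" skill || PySem.Str.isIn "prometheus" skill,
       st.2.2.2.1 || PySem.Str.isIn "ci/cd" skill || PySem.Str.isIn "jenkins" skill,
       st.2.2.2.2 || PySem.Str.isIn "security" skill))
    (false, false, false, false, false)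
  let out : List String := []
  let out := if !flags.1 then out ++ ["Master Kubernetes for container orchestration"] else out
  let out := if !flags.2.1 then out ++ ["Learn Infrastructure as Code (Terraform/Ansible)"] else out
  let out := if !flags.2.2.1 then out ++ ["Implement monitoring and observability solutions"] else out
  let out := if !flags.2.2.2.1 then out ++ ["Master CI/CD pipeline design and implementation"] else out
  let out := if !flags.2.2.2.2 then out ++ ["Learn DevSecOps and security automation"] else out
  out

-- ===== PRECONDITION & SPEC =====
def Spec_get_devops_recommendations_py (skills : List String) (experience : Int) (out : List String) : Prop := out = get_devops_recommendations_py_alt skills experience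
instance (skills : List String) (experience : Int) (out : List String) : Decidable (Spec_get_devops_recommendations_py skills experience out) := by unfold Spec_get_devops_recommendations_py; infer_instance

-- ===== CLAIM (what is proved, stated in full; the proofs are below) =====
def Claim_equal_get_devops_recommendations_py : Prop := ∀ (skills : List String) (experience : Int), Dom_get_devops_recommendations_py skills experience → Spec_get_devops_recommendations_py skills experience (get_devops_recommendations_py skills experience)

-- ===== LEMMAS AND PROOFS =====

-- the fold's components are exactly the five any-scans
theorem pv_fold5 (skills : List String) (a b c d e : Bool) :
    skills.foldl
      (fun (st : Bool × Bool × Bool × Bool × Bool) skill =>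
        (st.1 || PySem.Str.isIn "kubernetes" skill,
         st.2.1 || PySem.Str.isIn "terraform" skill || PySem.Str.isIn "ansible" skill,
         st.2.2.1 || PySem.Str.isIn "monitoring" skill || PySem.Str.isIn "prometheus" skill,
         st.2.2.2.1 || PySem.Str.isIn "ci/cd" skill || PySem.Str.isIn "jenkins" skill,
         st.2.2.2.2 || PySem.Str.isIn "security" skill))
      (a, b, c, d, e) =
    (a || skills.any (fun skill => PySem.Str.isIn "kubernetes" skill),
     b || skills.any (fun skill => PySem.Str.isIn "terraform" skill || PySem.Str.isIn "ansible" skill),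
     c || skills.any (fun skill => PySem.Str.isIn "monitoring" skill || PySem.Str.isIn "prometheus" skill),
     d || skills.any (fun skill => PySem.Str.isIn "ci/cd" skill || PySem.Str.isIn "jenkins" skill),
     e || skills.any (fun skill => PySem.Str.isIn "security" skill)) := by
  induction skills generalizing a b c d e with
  | nil => simp
  | cons x xs ih =>
    simp only [List.foldl_cons, List.any_cons, ih]
    simp [Bool.or_assoc]

-- ===== VERDICT (by name: the statement is the Claim_ definition above) =====
theorem get_devops_recommendations_py_spec : Claim_equal_get_devops_recommendations_py := by
  intro skills experience _
  unfold Spec_get_devops_recommendations_py get_devops_recommendations_py get_devops_recommendations_py_alt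
  rw [pv_fold5]
  simp
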